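-- pv_equiv track=rewrite | github.com/yurichsergey/python-study | 00_very_simple_scripts/06_simple_regex_engine.py | transform_regex
-- ===== SOURCE A (Python) =====
-- ANY_SYMBOL = 'any_symbol'
--
-- MAX_REPETITION = 99999
--
-- def transform_regex(regex: str) -> list:
--     obj: list = []
--     ind: int = -1
--     while True:
--         ind += 1
--         if (ind + 1) > len(regex):
--             break
--         letter: str = regex[ind]
--         if letter == '.':
--             letter = ANY_SYMBOL
--         quantum_letter: str = regex[ind + 1] if (ind + 1) < len(regex) else ''
--         if quantum_letter not in ['?', '+', '*', ]:
--             quantum_letter = ''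
--         if quantum_letter:
--             ind += 1
--         quantum = (0, 1,) if quantum_letter == '?' \
--             else (1, MAX_REPETITION) if quantum_letter == '+' \
--             else (0, MAX_REPETITION) if quantum_letter == '*' \
--             else (1, 1,)
--         obj.append((letter, quantum,))
--     return obj
-- ===== SOURCE B (Python) =====
-- ANY_SYMBOL = 'any_symbol'
--
-- MAX_REPETITION = 99999
--
-- QUANTA = {'?': (0, 1), '+': (1, MAX_REPETITION), '*': (0, MAX_REPETITION)}
--
-- def transform_regex(regex: str) -> list:
--     obj: list = []
--     open_slot = False  # previous char was consumed as a quantifiable letter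
--     for ch in regex:
--         if open_slot and ch in QUANTA:
--             letter, _ = obj[-1]
--             obj[-1] = (letter, QUANTA[ch])
--             open_slot = False
--         else:
--             obj.append((ANY_SYMBOL if ch == '.' else ch, (1, 1)))
--             open_slot = True
--     return obj
-- ===== Notes on version B (the rewrite author's own statement) =====
-- stated objective: alternative
-- what changed: Replaces A's index-based while loop with one-character lookahead (reading regex[ind+1] and skipping it) by a plain forward for-loop over the characters that appends every char with quantum (1,1) and back-patches the last appended tuple's quantum when a quantifier follows an open letter.
import Mathlib
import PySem

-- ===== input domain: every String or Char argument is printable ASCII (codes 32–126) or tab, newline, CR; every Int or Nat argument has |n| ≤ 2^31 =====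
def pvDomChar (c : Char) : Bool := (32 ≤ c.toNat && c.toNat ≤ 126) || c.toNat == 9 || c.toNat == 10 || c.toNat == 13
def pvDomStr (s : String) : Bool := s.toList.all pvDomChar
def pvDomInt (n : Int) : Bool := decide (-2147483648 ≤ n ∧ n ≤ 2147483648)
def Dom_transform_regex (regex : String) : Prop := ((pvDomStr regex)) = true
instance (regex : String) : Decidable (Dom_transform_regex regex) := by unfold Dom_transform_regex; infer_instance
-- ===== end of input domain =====

-- B replaces A's lookahead-and-skip while loop by a forward loop that back-patches
-- the last appended tuple's quantum (objective: alternative decomposition, same cost).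


-- ===== PORT A =====
-- A walks an index, reads the current char and the next one; if the next is a
-- quantifier it determines the quantum and the index skips it. The index walk is
-- the structural recursion on the remaining character list.
def transformGoA : List Char → List (String × (Int × Int))
  | [] => []
  | c :: rest =>
    let letter : String := if c = '.' then "any_symbol" else String.ofList [c]
    match rest with
    | d :: rest' =>
      if d = '?' ∨ d = '+' ∨ d = '*' then
        let quantum : Int × Int :=
          if d = '?' then (0, 1) else if d = '+' then (1, 99999) else (0, 99999)
        (letter, quantum) :: transformGoA rest'
      else
        (letter, (1, 1)) :: transformGoA (d :: rest')
    | [] => [(letter, (1, 1))]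
termination_by l => l.length
decreasing_by all_goals (simp; try omega)

def transform_regex (regex : String) : List (String × (Int × Int)) :=
  transformGoA regex.toList

-- ===== PORT B =====
def qOfB (c : Char) : Int × Int :=
  if c = '?' then (0, 1) else if c = '+' then (1, 99999) else (0, 99999)

def transformGoB : Bool → List (String × (Int × Int)) → List Char → List (String × (Int × Int))
  | _, acc, [] => acc.reverse
  | opn, acc, c :: rest =>
    if opn && (c = '?' || c = '+' || c = '*') then
      match acc with
      | (letter, _) :: acc' => transformGoB false ((letter, qOfB c) :: acc') rest
      | [] => transformGoB false acc rest  -- unreachable: opn implies acc ≠ []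
    else
      transformGoB true ((if c = '.' then "any_symbol" else String.ofList [c], (1, 1)) :: acc) rest

def transform_regex_alt (regex : String) : List (String × (Int × Int)) :=
  transformGoB false [] regex.toList

-- ===== PRECONDITION & SPEC =====
def Spec_transform_regex (regex : String) (out : List (String × (Int × Int))) : Prop := out = transform_regex_alt regex
instance (regex : String) (out : List (String × (Int × Int))) : Decidable (Spec_transform_regex regex out) := by unfold Spec_transform_regex; infer_instance

-- ===== CLAIM (what is proved, stated in full; the proofs are below) =====
def Claim_equal_transform_regex : Prop := ∀ (regex : String), Dom_transform_regex regex → Spec_transform_regex regex (transform_regex regex)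

-- ===== LEMMAS AND PROOFS =====

-- What A produces for a letter already consumed, given the remaining characters.
def stepA (letter : String) : List Char → List (String × (Int × Int))
  | d :: rest' =>
    if d = '?' ∨ d = '+' ∨ d = '*' then
      (letter, if d = '?' then (0, 1) else if d = '+' then (1, 99999) else (0, 99999))
        :: transformGoA rest'
    else
      (letter, (1, 1)) :: transformGoA (d :: rest')
  | [] => [(letter, (1, 1))]

lemma transformGoA_cons (c : Char) (rest : List Char) :
    transformGoA (c :: rest) =
      stepA (if c = '.' then "any_symbol" else String.ofList [c]) rest := by
  cases rest with
  | nil => simp [transformGoA, stepA]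
  | cons d rest' =>
    by_cases h : d = '?' ∨ d = '+' ∨ d = '*'
    · simp only [transformGoA, stepA, if_pos h]
    · simp only [transformGoA, stepA, if_neg h]

lemma goB_correct (l : List Char) :
    (∀ acc, transformGoB false acc l = acc.reverse ++ transformGoA l) ∧
    (∀ acc letter, transformGoB true ((letter, (1, 1)) :: acc) l
        = acc.reverse ++ stepA letter l) := by
  induction l with
  | nil =>
    constructor
    · intro acc; simp [transformGoB, transformGoA]
    · intro acc letter; simp [transformGoB, stepA]
  | cons c rest ih =>
    constructor
    · intro acc
      simp only [transformGoB, Bool.false_and, Bool.false_eq_true, if_false]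
      rw [ih.2, transformGoA_cons]
    · intro acc letter
      by_cases h : c = '?' ∨ c = '+' ∨ c = '*'
      · have hb : (c = '?' || c = '+' || c = '*') = true := by
          rcases h with h | h | h <;> simp [h]
        simp only [transformGoB, Bool.true_and, hb, if_true]
        rw [ih.1]
        simp [stepA, h, qOfB]
      · have hb : (c = '?' || c = '+' || c = '*') = false := by
          cases hc : (c = '?' || c = '+' || c = '*') with
          | false => rfl
          | true => exact absurd (by simpa [or_assoc] using hc) h
        simp only [transformGoB, Bool.true_and, hb, Bool.false_eq_true, if_false]
        rw [ih.2]
        have hs : stepA letter (c :: rest) = (letter, (1, 1)) :: transformGoA (c :: rest) := by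
          simp [stepA, h]
        rw [hs, transformGoA_cons]
        simp

-- ===== VERDICT (by name: the statement is the Claim_ definition above) =====
theorem transform_regex_spec : Claim_equal_transform_regex := by
  intro regex _
  unfold Spec_transform_regex transform_regex transform_regex_alt
  rw [(goB_correct regex.toList).1 []]
  simp
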